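-- pv_equiv track=rewrite | github.com/akshay-greenlang/Code-V1_GreenLang | packs/ghg-accounting/PACK-045-base-year/templates/audit_trail_report.py | _md_summary
-- ===== SOURCE A (Python) =====
-- from typing import Any, Dict, List, Optional
--
-- def _md_summary(data: Dict[str, Any]) -> str:
--     """Render Markdown audit summary."""
--     entries = data.get("entries", [])
--     by_type: Dict[str, int] = {}
--     for e in entries:
--         etype = e.get("event_type", "other")
--         by_type[etype] = by_type.get(etype, 0) + 1
--     lines = ["## 1. Audit Summary", ""]
--     for k, v in sorted(by_type.items()):
--         lines.append(f"- **{k}:** {v} entries")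
--     return "\n".join(lines)
-- ===== SOURCE B (Python) =====
-- from itertools import groupby
-- from typing import Any, Dict
--
--
-- def _md_summary(data: Dict[str, Any]) -> str:
--     """Render Markdown audit summary (sort-then-group instead of dict counting)."""
--     entries = data.get("entries", [])
--     types = sorted(e.get("event_type", "other") for e in entries)
--     lines = ["## 1. Audit Summary", ""]
--     for k, g in groupby(types):
--         lines.append(f"- **{k}:** {sum(1 for _ in g)} entries")
--     return "\n".join(lines)
-- ===== Notes on version B (the rewrite author's own statement) =====
-- stated objective: alternative
-- what changed: Replaces the dict-accumulate-counts-then-sort-items pass with extracting all event types, sorting them once, and emitting one line per consecutive run via itertools.groupby (run length = count).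
import Mathlib
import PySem

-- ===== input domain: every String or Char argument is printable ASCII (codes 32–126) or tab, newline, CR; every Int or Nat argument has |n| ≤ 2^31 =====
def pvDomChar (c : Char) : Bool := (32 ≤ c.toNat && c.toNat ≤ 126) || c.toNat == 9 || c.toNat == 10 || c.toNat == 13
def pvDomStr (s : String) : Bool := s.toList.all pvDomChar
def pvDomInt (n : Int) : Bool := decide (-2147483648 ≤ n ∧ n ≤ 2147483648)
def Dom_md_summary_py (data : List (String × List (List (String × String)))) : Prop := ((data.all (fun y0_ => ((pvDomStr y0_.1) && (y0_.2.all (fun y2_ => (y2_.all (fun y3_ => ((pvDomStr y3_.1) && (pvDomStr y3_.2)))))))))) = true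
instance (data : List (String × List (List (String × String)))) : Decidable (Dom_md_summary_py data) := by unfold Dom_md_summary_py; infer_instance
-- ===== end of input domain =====

-- B replaces A's dict-accumulate-then-sort-items counting with sort-all-event-types-then-scan-consecutive-runs; same output, alternative algorithm.
-- (String concatenation '++' renders the f-string; it is exact on these inputs.)

-- shared helper: e.get("event_type", "other") — first-match association-list lookup with default
def pvEventType (e : List (String × String)) : String :=
  (((e.find? (fun p => p.1 == "event_type")).map (fun p => p.2)).getD "other")

-- ===== PORT A =====
def md_summary_py (data : List (String × List (List (String × String)))) : String :=
  let entries := ((data.find? (fun p => p.1 == "entries")).map (fun p => p.2)).getD []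
  let byType := entries.foldl
    (fun d e => d.insert (pvEventType e) (d.getD (pvEventType e) 0 + 1))
    (PySem.Dict.empty : PySem.Dict String Int)
  let lines := (PySem.List.sorted2 byType.items (fun kv => kv.1) (fun kv => kv.2)).foldl
    (fun acc kv => acc ++ ["- **" ++ kv.1 ++ ":** " ++ PySem.Int.toStr kv.2 ++ " entries"])
    ["## 1. Audit Summary", ""]
  PySem.Str.join "\n" lines

-- ===== PORT B =====
def pvLineB (k : String) (n : Int) : String :=
  "- **" ++ k ++ ":** " ++ PySem.Int.toStr n ++ " entries"

-- itertools.groupby on a list: one line per consecutive run (run length = the count)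
def pvGroupsB : List String → List String
  | [] => []
  | x :: rest =>
      pvLineB x (1 + ((rest.takeWhile (fun y => y == x)).length : Int)) ::
        pvGroupsB (rest.dropWhile (fun y => y == x))
  termination_by s => s.length
  decreasing_by
    have := List.length_dropWhile_le (fun y => y == x) rest
    simpa using Nat.lt_succ_of_le this

def md_summary_py_alt (data : List (String × List (List (String × String)))) : String :=
  let entries := ((data.find? (fun p => p.1 == "entries")).map (fun p => p.2)).getD []
  let types := PySem.List.sorted (entries.map pvEventType) (fun x => x)
  PySem.Str.join "\n" (["## 1. Audit Summary", ""] ++ pvGroupsB types)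

-- ===== PRECONDITION & SPEC =====
def Spec_md_summary_py (data : List (String × List (List (String × String)))) (out : String) : Prop := out = md_summary_py_alt data
instance (data : List (String × List (List (String × String)))) (out : String) : Decidable (Spec_md_summary_py data out) := by unfold Spec_md_summary_py; infer_instance

-- ===== CLAIM (what is proved, stated in full; the proofs are below) =====
def Claim_equal_md_summary_py : Prop := ∀ (data : List (String × List (List (String × String)))), Dom_md_summary_py data → Spec_md_summary_py data (md_summary_py data)

-- ===== LEMMAS AND PROOFS =====

-- the first element of each consecutive run of a list (proof-only skeleton of pvGroupsB)
def pvKeys : List String → List String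
  | [] => []
  | x :: rest => x :: pvKeys (rest.dropWhile (fun y => y == x))
  termination_by s => s.length
  decreasing_by
    have := List.length_dropWhile_le (fun y => y == x) rest
    simpa using Nat.lt_succ_of_le this

theorem insertBy_congr {α : Type} (bf bf' : α → α → Bool) (x : α) (ys : List α)
    (h : ∀ y ∈ ys, bf x y = bf' x y) :
    PySem.List.insertBy bf x ys = PySem.List.insertBy bf' x ys := by
  induction ys with
  | nil => rfl
  | cons y ys ih =>
      simp only [PySem.List.insertBy]
      rw [h y (by simp)]
      by_cases hb : bf' x y = true
      · simp [hb]
      · simp only [hb]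
        rw [ih (fun z hz => h z (by simp [hz]))]

theorem foldl_insertBy_congr {α : Type} (bf bf' : α → α → Bool) (S : List α)
    (hbb : ∀ a ∈ S, ∀ b ∈ S, bf a b = bf' a b) :
    ∀ (xs acc : List α), (∀ a ∈ xs, a ∈ S) → (∀ a ∈ acc, a ∈ S) →
      xs.foldl (fun acc x => PySem.List.insertBy bf x acc) acc
        = xs.foldl (fun acc x => PySem.List.insertBy bf' x acc) acc := by
  intro xs
  induction xs with
  | nil => intro acc _ _; rfl
  | cons x xs ih =>
      intro acc hxs hacc
      simp only [List.foldl_cons]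
      have hx : x ∈ S := hxs x (by simp)
      rw [insertBy_congr bf bf' x acc (fun y hy => hbb x hx y (hacc y hy))]
      exact ih _ (fun a ha => hxs a (by simp [ha]))
        (fun a ha => by
          rcases (PySem.List.mem_insertBy _ _ _ _).1 ha with h | h
          · exact h ▸ hx
          · exact hacc a h)

theorem sorted2_eq_sorted_fst (xs : List (String × Int))
    (h : (xs.map Prod.fst).Nodup) :
    PySem.List.sorted2 xs (fun kv => kv.1) (fun kv => kv.2)
      = PySem.List.sorted xs (fun kv => kv.1) := by
  have hinj : ∀ a ∈ xs, ∀ b ∈ xs, a.1 = b.1 → a = b := by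
    intro a ha b hb hab
    exact List.inj_on_of_nodup_map h ha hb hab
  simp only [PySem.List.sorted2, PySem.List.sorted, if_neg (by decide : ¬ (false = true))]
  apply foldl_insertBy_congr _ _ xs _ xs [] (fun a ha => ha) (by simp)
  intro a ha b hb
  by_cases h1 : a.1 < b.1
  · simp [h1]
  · by_cases h2 : b.1 < a.1
    · simp [h1, h2]
    · have : a = b := hinj a ha b hb (le_antisymm (not_lt.1 h2) (not_lt.1 h1))
      subst this
      simp

theorem lt_of_mem_dropWhile (x : String) (rest : List String)
    (h : (x :: rest).Pairwise (· ≤ ·)) :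
    ∀ y ∈ rest.dropWhile (fun y => y == x), x < y := by
  induction rest with
  | nil => simp
  | cons r rs ih =>
      intro y hy
      by_cases hr : r == x
      · rw [List.dropWhile_cons_of_pos (by simpa using hr)] at hy
        have h' : (x :: rs).Pairwise (· ≤ ·) := by
          have : (x :: rs).Sublist (x :: r :: rs) := by
            exact List.Sublist.cons₂ x (List.sublist_cons_self r rs)
          exact h.sublist this
        exact ih h' y hy
      · rw [List.dropWhile_cons_of_neg (by simpa using hr)] at hy
        have hxr : x ≤ r := (List.pairwise_cons.1 h).1 r (by simp)
        have hrx : r ≠ x := fun hEq => hr (by rw [hEq]; exact beq_self_eq_true x)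
        have hxr' : x < r := lt_of_le_of_ne hxr (Ne.symm hrx)
        rcases List.mem_cons.1 hy with rfl | hy'
        · exact hxr'
        · have hrs : (r :: rs).Pairwise (· ≤ ·) := (List.pairwise_cons.1 h).2
          exact lt_of_lt_of_le hxr' ((List.pairwise_cons.1 hrs).1 y hy')

theorem count_head_run (x : String) (rest : List String)
    (h : (x :: rest).Pairwise (· ≤ ·)) :
    (x :: rest).count x = 1 + (rest.takeWhile (fun y => y == x)).length := by
  have hsplit : rest = rest.takeWhile (fun y => y == x) ++ rest.dropWhile (fun y => y == x) :=
    (List.takeWhile_append_dropWhile).symm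
  have h1 : (rest.takeWhile (fun y => y == x)).count x
      = (rest.takeWhile (fun y => y == x)).length := by
    apply List.count_eq_length.2
    intro b hb
    have hb2 := List.mem_takeWhile_imp hb
    exact (beq_iff_eq.1 hb2).symm
  have h2 : (rest.dropWhile (fun y => y == x)).count x = 0 := by
    apply List.count_eq_zero.2
    intro hx
    exact absurd (lt_of_mem_dropWhile x rest h x hx) (lt_irrefl x)
  calc (x :: rest).count x = rest.count x + 1 := List.count_cons_self
    _ = 1 + (rest.takeWhile (fun y => y == x)).length := by
        conv_lhs => rw [hsplit]
        rw [List.count_append, h1, h2]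
        omega

theorem mem_pvKeys (s : List String) (k : String) : k ∈ pvKeys s ↔ k ∈ s := by
  induction s using pvKeys.induct with
  | case1 => simp [pvKeys]
  | case2 x rest ih =>
      rw [pvKeys]
      constructor
      · intro hk
        rcases List.mem_cons.1 hk with rfl | hk'
        · simp
        · have := ih.1 hk'
          exact List.mem_cons.2 (Or.inr ((List.dropWhile_sublist _).mem this))
      · intro hk
        rcases List.mem_cons.1 hk with rfl | hk'
        · simp
        · conv at hk' => rw [← List.takeWhile_append_dropWhile (p := fun y => y == x) (l := rest)]
          rcases List.mem_append.1 hk' with h1 | h2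
          · have := List.mem_takeWhile_imp h1
            simp_all
          · exact List.mem_cons.2 (Or.inr (ih.2 h2))

theorem pairwise_lt_pvKeys (s : List String) (h : s.Pairwise (· ≤ ·)) :
    (pvKeys s).Pairwise (· < ·) := by
  induction s using pvKeys.induct with
  | case1 => simp [pvKeys]
  | case2 x rest ih =>
      rw [pvKeys]
      refine List.pairwise_cons.2 ⟨?_, ?_⟩
      · intro y hy
        exact lt_of_mem_dropWhile x rest h y ((mem_pvKeys _ _).1 hy)
      · exact ih ((List.pairwise_cons.1 h).2.sublist (List.dropWhile_sublist _))

theorem groups_eq (s : List String) (h : s.Pairwise (· ≤ ·)) :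
    pvGroupsB s = (pvKeys s).map (fun k => pvLineB k (s.count k : Int)) := by
  induction s using pvKeys.induct with
  | case1 => simp [pvGroupsB, pvKeys]
  | case2 x rest ih =>
      rw [pvGroupsB, pvKeys, List.map_cons]
      have hcount : ((x :: rest).count x : Int)
          = 1 + ((rest.takeWhile (fun y => y == x)).length : Int) := by
        rw [count_head_run x rest h]; push_cast; ring
      rw [hcount.symm]
      congr 1
      have hd : (rest.dropWhile (fun y => y == x)).Pairwise (· ≤ ·) :=
        (List.pairwise_cons.1 h).2.sublist (List.dropWhile_sublist _)
      rw [ih hd]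
      apply List.map_congr_left
      intro k hk
      have hkd : k ∈ rest.dropWhile (fun y => y == x) := (mem_pvKeys _ _).1 hk
      have hxk : x < k := lt_of_mem_dropWhile x rest h k hkd
      have hne : (x == k) = false := beq_eq_false_iff_ne.2 (ne_of_lt hxk)
      congr 1
      have hsplit : rest = rest.takeWhile (fun y => y == x) ++ rest.dropWhile (fun y => y == x) :=
        (List.takeWhile_append_dropWhile).symm
      have ht : (rest.takeWhile (fun y => y == x)).count k = 0 := by
        apply List.count_eq_zero.2
        intro hkt
        have h2 := List.mem_takeWhile_imp hkt
        exact absurd (beq_iff_eq.1 h2) (ne_of_gt hxk)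
      have : (x :: rest).count k = (rest.dropWhile (fun y => y == x)).count k := by
        rw [List.count_cons]
        conv_lhs => rw [hsplit]
        rw [List.count_append, ht, hne]
        simp
      rw [this]

theorem key_lemma (ts : List String) :
    (PySem.List.sorted2 ((PySem.Set.ofList ts).map (fun k => (k, (ts.count k : Int))))
        (fun kv => kv.1) (fun kv => kv.2)).map
      (fun kv => "- **" ++ kv.1 ++ ":** " ++ PySem.Int.toStr kv.2 ++ " entries")
    = pvGroupsB (PySem.List.sorted ts (fun x => x)) := by
  set S := PySem.List.sorted ts (fun x => x) with hSdef
  have hS : S.Pairwise (· ≤ ·) := by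
    simpa using PySem.List.sorted_pairwise ts (fun x => x)
  have hperm : (pvKeys S).Perm (PySem.Set.ofList ts) := by
    refine (List.perm_ext_iff_of_nodup ?_ (PySem.Set.nodup_ofList ts)).2 ?_
    · exact ((pairwise_lt_pvKeys S hS).imp fun h => ne_of_lt h)
    · intro a
      rw [mem_pvKeys, PySem.Set.mem_ofList, hSdef, PySem.List.mem_sorted]
  have hnodupfst : ((PySem.Set.ofList ts).map (fun k => (k, (ts.count k : Int))) |>.map Prod.fst).Nodup := by
    rw [List.map_map]
    rw [show (Prod.fst ∘ fun k : String => (k, (ts.count k : Int))) = id from rfl, List.map_id]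
    exact PySem.Set.nodup_ofList ts
  rw [sorted2_eq_sorted_fst _ hnodupfst]
  have hsorted : PySem.List.sorted ((PySem.Set.ofList ts).map (fun k => (k, (ts.count k : Int))))
      (fun kv => kv.1) = (pvKeys S).map (fun k => (k, (ts.count k : Int))) := by
    apply PySem.List.sorted_eq_of_perm_of_pairwise_lt
    · exact hperm.map _
    · exact List.pairwise_map.2 (pairwise_lt_pvKeys S hS)
  rw [hsorted, groups_eq S hS, List.map_map]
  apply List.map_congr_left
  intro k _
  have hc : S.count k = ts.count k := (PySem.List.sorted_perm ts (fun x => x) false).count_eq k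
  simp [pvLineB, Function.comp, hc]

-- ===== VERDICT (by name: the statement is the Claim_ definition above) =====
theorem md_summary_py_spec : Claim_equal_md_summary_py := by
  intro data _hdom
  unfold Spec_md_summary_py
  dsimp only [md_summary_py, md_summary_py_alt]
  generalize ((Option.map (fun p => p.2) (List.find? (fun p => p.1 == "entries") data)).getD [] :
    List (List (String × String))) = entries
  have hdict : List.foldl (fun d e => d.insert (pvEventType e) (d.getD (pvEventType e) 0 + 1))
      (PySem.Dict.empty : PySem.Dict String Int) entries
      = PySem.Dict.counter (entries.map pvEventType) := by
    rw [← PySem.Dict.foldl_insert_getD_add_one_eq_counter, List.foldl_map]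
  rw [hdict, PySem.Dict.items_counter, PySem.List.foldl_append_singleton_eq_map]
  congr 1
  congr 1
  exact key_lemma _
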